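-- pv_equiv track=rewrite | github.com/pointtonull/anki-external_editor | src/utils.py | split_exec_options
-- ===== SOURCE A (Python) =====
-- def split_exec_options(cmd):
--
--     executable = ""
--     options = ""
--
--     escape = False
--     for char in cmd:
--         if options:
--             options += char
--         elif escape:
--             escape = False
--             executable += char
--         elif char == "\\":
--             escape = True
--         elif char == " ":
--             options += char
--         else:
--             executable += char
--
--     return executable, options
-- ===== SOURCE B (Python) =====
-- def split_exec_options(cmd):
--     # Locate the first unescaped space in one scan.
--     split = None
--     esc = False
--     for i, ch in enumerate(cmd):
--         if esc:
--             esc = False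
--         elif ch == "\\":
--             esc = True
--         elif ch == " ":
--             split = i
--             break
--     if split is None:
--         prefix, options = cmd, ""
--     else:
--         prefix, options = cmd[:split], cmd[split:]
--     # Unescape the executable prefix: backslash escapes the next char and is dropped.
--     out = []
--     esc = False
--     for ch in prefix:
--         if esc:
--             out.append(ch)
--             esc = False
--         elif ch == "\\":
--             esc = True
--         else:
--             out.append(ch)
--     return "".join(out), options
-- ===== Notes on version B (the rewrite author's own statement) =====
-- stated objective: alternative
-- what changed: Instead of one stateful loop that builds both output strings while a nonempty-options flag routes every character, B first scans only for the index of the first unescaped space, then takes the options as a verbatim slice and unescapes just the prefix.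
import Mathlib
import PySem

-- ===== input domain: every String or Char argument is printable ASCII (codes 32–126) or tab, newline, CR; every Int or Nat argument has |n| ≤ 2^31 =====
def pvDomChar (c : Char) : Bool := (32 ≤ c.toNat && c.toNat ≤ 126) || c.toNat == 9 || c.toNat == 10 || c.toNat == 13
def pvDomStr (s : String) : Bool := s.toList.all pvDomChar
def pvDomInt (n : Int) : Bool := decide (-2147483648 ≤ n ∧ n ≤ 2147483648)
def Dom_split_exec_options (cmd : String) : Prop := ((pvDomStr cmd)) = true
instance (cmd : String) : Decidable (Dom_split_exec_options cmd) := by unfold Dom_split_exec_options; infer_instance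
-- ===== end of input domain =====

-- B splits at the first unescaped space found by a scan, slicing the options verbatim and
-- unescaping only the prefix, instead of A's single loop building both strings with a flag.

-- ===== PORT A =====
-- A's for-loop: state (executable, options, escape), chars appended at the back.
def seoLoopA : List Char → List Char → List Char → Bool → List Char × List Char
  | [], ex, op, _ => (ex, op)
  | c :: cs, ex, op, esc =>
    if op ≠ [] then seoLoopA cs ex (op ++ [c]) esc
    else if esc then seoLoopA cs (ex ++ [c]) op false
    else if c = '\\' then seoLoopA cs ex op true
    else if c = ' ' then seoLoopA cs ex (op ++ [c]) esc
    else seoLoopA cs (ex ++ [c]) op false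

def split_exec_options (cmd : String) : String × String :=
  let r := seoLoopA cmd.toList [] [] false
  (String.ofList r.1, String.ofList r.2)

-- ===== PORT B =====
-- scan for the index of the first unescaped space (Source B's first loop)
def seoFindIdx : List Char → Bool → Option Nat
  | [], _ => none
  | c :: cs, esc =>
    if esc then (seoFindIdx cs false).map (· + 1)
    else if c = '\\' then (seoFindIdx cs true).map (· + 1)
    else if c = ' ' then some 0
    else (seoFindIdx cs false).map (· + 1)

-- unescape the prefix (Source B's second loop)
def seoUnesc : List Char → Bool → List Char
  | [], _ => []
  | c :: cs, esc =>
    if esc then c :: seoUnesc cs false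
    else if c = '\\' then seoUnesc cs true
    else c :: seoUnesc cs false

def split_exec_options_alt (cmd : String) : String × String :=
  let cs := cmd.toList
  match seoFindIdx cs false with
  | none => (String.ofList (seoUnesc cs false), "")
  | some i => (String.ofList (seoUnesc (cs.take i) false), String.ofList (cs.drop i))

-- ===== PRECONDITION & SPEC =====
def Spec_split_exec_options (cmd : String) (out : String × String) : Prop := out = split_exec_options_alt cmd
instance (cmd : String) (out : String × String) : Decidable (Spec_split_exec_options cmd out) := by unfold Spec_split_exec_options; infer_instance

-- ===== CLAIM (what is proved, stated in full; the proofs are below) =====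
def Claim_equal_split_exec_options : Prop := ∀ (cmd : String), Dom_split_exec_options cmd → Spec_split_exec_options cmd (split_exec_options cmd)

-- ===== LEMMAS AND PROOFS =====

-- once options is nonempty, A's loop just appends the rest verbatim
theorem seoLoopA_opFull (cs : List Char) : ∀ (ex op : List Char) (esc : Bool), op ≠ [] →
    seoLoopA cs ex op esc = (ex, op ++ cs) := by
  induction cs with
  | nil => intro ex op esc _; simp [seoLoopA]
  | cons c cs ih =>
    intro ex op esc h
    simp only [seoLoopA, if_pos h]
    rw [ih _ _ _ (by simp)]
    simp

-- A's loop with empty options, characterised by B's find/unescape decomposition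
theorem seoLoopA_char (cs : List Char) : ∀ (ex : List Char) (esc : Bool),
    seoLoopA cs ex [] esc =
      match seoFindIdx cs esc with
      | none => (ex ++ seoUnesc cs esc, [])
      | some i => (ex ++ seoUnesc (cs.take i) esc, cs.drop i) := by
  induction cs with
  | nil => intro ex esc; simp [seoLoopA, seoFindIdx, seoUnesc]
  | cons c cs ih =>
    intro ex esc
    cases esc with
    | true =>
      cases h : seoFindIdx cs false with
      | none => simp [seoLoopA, seoFindIdx, seoUnesc, ih, h]
      | some i => simp [seoLoopA, seoFindIdx, seoUnesc, ih, h, List.take_succ_cons,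
          List.drop_succ_cons]
    | false =>
      by_cases hbs : c = '\\'
      · subst hbs
        cases h : seoFindIdx cs true with
        | none => simp [seoLoopA, seoFindIdx, seoUnesc, ih, h]
        | some i => simp [seoLoopA, seoFindIdx, seoUnesc, ih, h, List.take_succ_cons,
            List.drop_succ_cons]
      · by_cases hsp : c = ' '
        · subst hsp
          rw [show seoLoopA (' ' :: cs) ex [] false = seoLoopA cs ex [' '] false from by
            simp [seoLoopA]]
          rw [seoLoopA_opFull cs ex [' '] false (by simp)]
          simp [seoFindIdx, seoUnesc]
        · cases h : seoFindIdx cs false with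
          | none => simp [seoLoopA, seoFindIdx, seoUnesc, ih, h, hbs, hsp]
          | some i => simp [seoLoopA, seoFindIdx, seoUnesc, ih, h, hbs, hsp,
              List.take_succ_cons, List.drop_succ_cons]

-- ===== VERDICT (by name: the statement is the Claim_ definition above) =====
theorem split_exec_options_spec : Claim_equal_split_exec_options := by
  intro cmd _
  unfold Spec_split_exec_options split_exec_options split_exec_options_alt
  rw [seoLoopA_char]
  cases h : seoFindIdx cmd.toList false <;> simp [h]
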